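-- pv_equiv track=rewrite | github.com/ARBasharat/TopFD_python | src/topfd/score/compute_score_components.py | count_max_consecutive_peak_num
-- ===== SOURCE A (Python) =====
-- def count_max_consecutive_peak_num(peaks):
--   n = 0
--   max_consecutive_peak_num = 0
--   for peak in peaks:
--     if peak is not None:
--       n = n + 1
--       if (n > max_consecutive_peak_num):
--         max_consecutive_peak_num = n
--     else:
--       n = 0
--   return max_consecutive_peak_num
-- ===== SOURCE B (Python) =====
-- from itertools import groupby
--
-- def count_max_consecutive_peak_num(peaks):
--   return max((sum(1 for _ in g) for k, g in groupby(peaks, key=lambda p: p is not None) if k),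
--              default=0)
-- ===== Notes on version B (the rewrite author's own statement) =====
-- stated objective: idiomatic
-- what changed: Replaces the running-counter-with-reset loop by an itertools.groupby decomposition: partition the list into maximal runs keyed by 'p is not None', measure each True run, take the max with default 0.
import Mathlib
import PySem

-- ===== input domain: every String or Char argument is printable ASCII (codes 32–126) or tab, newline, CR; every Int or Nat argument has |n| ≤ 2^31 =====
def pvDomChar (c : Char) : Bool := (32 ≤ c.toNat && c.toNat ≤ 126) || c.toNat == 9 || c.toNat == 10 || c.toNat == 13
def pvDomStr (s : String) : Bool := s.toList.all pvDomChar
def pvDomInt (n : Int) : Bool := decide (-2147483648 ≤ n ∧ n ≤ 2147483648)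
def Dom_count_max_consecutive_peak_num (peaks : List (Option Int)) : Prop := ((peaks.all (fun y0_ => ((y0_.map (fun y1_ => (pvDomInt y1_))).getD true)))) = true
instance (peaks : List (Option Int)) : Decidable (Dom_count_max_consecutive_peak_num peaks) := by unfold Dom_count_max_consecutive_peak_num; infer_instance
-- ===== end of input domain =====

-- B replaces the running-counter-with-reset loop by a groupby decomposition (maximal runs,
-- measure the non-None runs, max with default 0); objective: idiomatic, same O(n) cost.


-- ===== PORT A =====
-- literal port of A's loop: state (n, max_consecutive_peak_num), branch order as in the Python
def count_max_consecutive_peak_num (peaks : List (Option Int)) : Int :=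
  (peaks.foldl
    (fun (st : Int × Int) peak =>
      match peak with
      | some _ =>
          let n := st.1 + 1
          if n > st.2 then (n, n) else (n, st.2)
      | none => (0, st.2))
    (0, 0)).2

-- ===== PORT B =====
-- port of itertools.groupby keyed by `p is not None`: each group is (key, length of the maximal run)
def pvGroups (l : List (Option Int)) : List (Bool × Int) :=
  match l with
  | [] => []
  | p :: t =>
      let k := p.isSome
      (k, 1 + (t.takeWhile (fun q => q.isSome == k)).length) ::
        pvGroups (t.dropWhile (fun q => q.isSome == k))
  termination_by l.length
  decreasing_by
    simpa using Nat.lt_succ_of_le (List.length_dropWhile_le _ _)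

-- max over the True-group lengths, default 0
def count_max_consecutive_peak_num_alt (peaks : List (Option Int)) : Int :=
  ((pvGroups peaks).filterMap (fun g => if g.1 then some g.2 else none)).foldl max 0

-- ===== PRECONDITION & SPEC =====
def Spec_count_max_consecutive_peak_num (peaks : List (Option Int)) (out : Int) : Prop := out = count_max_consecutive_peak_num_alt peaks
instance (peaks : List (Option Int)) (out : Int) : Decidable (Spec_count_max_consecutive_peak_num peaks out) := by unfold Spec_count_max_consecutive_peak_num; infer_instance

-- ===== CLAIM (what is proved, stated in full; the proofs are below) =====
def Claim_equal_count_max_consecutive_peak_num : Prop := ∀ (peaks : List (Option Int)), Dom_count_max_consecutive_peak_num peaks → Spec_count_max_consecutive_peak_num peaks (count_max_consecutive_peak_num peaks)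

-- ===== LEMMAS AND PROOFS =====

-- element-by-element "max run from here, given a current prefix run of length n"
def pvG (n : Int) : List (Option Int) → Int
  | [] => 0
  | none :: t => pvG 0 t
  | some _ :: t => max (n + 1) (pvG (n + 1) t)

theorem pvA_step (l : List (Option Int)) : ∀ (n m : Int), 0 ≤ n → n ≤ m →
    (l.foldl
      (fun (st : Int × Int) peak =>
        match peak with
        | some _ =>
            let n := st.1 + 1
            if n > st.2 then (n, n) else (n, st.2)
        | none => (0, st.2))
      (n, m)).2 = max m (pvG n l) := by
  induction l with
  | nil => intro n m h1 h2; simp only [List.foldl_nil, pvG]; omega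
  | cons p t ih =>
    intro n m h1 h2
    cases p with
    | none =>
      simp only [List.foldl_cons, pvG]
      rw [ih 0 m (le_refl 0) (by omega)]
    | some a =>
      simp only [List.foldl_cons, pvG]
      by_cases h : n + 1 > m
      · simp only [if_pos h]
        rw [ih (n+1) (n+1) (by omega) (le_refl _)]
        omega
      · simp only [if_neg h]
        rw [ih (n+1) m (by omega) (by omega)]
        omega

theorem pvG_reset (l : List (Option Int)) (h : l = [] ∨ ∃ r, l = none :: r) (k : Int) :
    pvG k l = pvG 0 l := by
  rcases h with h | ⟨r, h⟩ <;> subst h <;> simp [pvG]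

theorem pvG_some_run (tw : List (Option Int)) (htw : ∀ x ∈ tw, x.isSome = true) :
    ∀ (dw : List (Option Int)) (a : Int) (n : Int), 0 ≤ n →
    pvG n (some a :: (tw ++ dw)) = max (n + 1 + tw.length) (pvG (n + 1 + tw.length) dw) := by
  induction tw with
  | nil => intro dw a n hn; simp [pvG]
  | cons x tw' ih =>
    intro dw a n hn
    have hx : x.isSome = true := htw x (by simp)
    obtain ⟨b, rfl⟩ := Option.isSome_iff_exists.mp hx
    have htw' : ∀ y ∈ tw', y.isSome = true := fun y hy => htw y (by simp [hy])
    have h := ih htw' dw b (n+1) (by omega)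
    simp only [pvG] at h
    have e : n+1+1+(tw'.length:Int) = n+1+((tw'.length:Int)+1) := by ring
    rw [e] at h
    simp only [pvG, List.cons_append, List.length_cons]
    rw [h]
    push_cast
    omega

theorem pvG_none_run (tw : List (Option Int)) (htw : ∀ x ∈ tw, x.isSome = false) :
    ∀ (dw : List (Option Int)), pvG 0 (tw ++ dw) = pvG 0 dw := by
  induction tw with
  | nil => intro dw; simp
  | cons x tw' ih =>
    intro dw
    have hx : x.isSome = false := htw x (by simp)
    have : x = none := by cases x <;> simp_all
    subst this
    simpa [pvG] using ih (fun y hy => htw y (by simp [hy])) dw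

theorem pvFoldMax (xs : List Int) : ∀ (a b : Int), xs.foldl max (max a b) = max a (xs.foldl max b) := by
  induction xs with
  | nil => intro a b; simp
  | cons x xs ih =>
    intro a b
    simp only [List.foldl_cons]
    rw [max_assoc, ih]


theorem pvGroups_nil : pvGroups ([] : List (Option Int)) = [] := by
  rw [pvGroups]

theorem pvGroups_cons (p : Option Int) (t : List (Option Int)) :
    pvGroups (p :: t)
      = (p.isSome, 1 + ((t.takeWhile (fun q => q.isSome == p.isSome)).length : Int)) ::
          pvGroups (t.dropWhile (fun q => q.isSome == p.isSome)) := by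
  rw [pvGroups]

theorem pvG_nonneg (l : List (Option Int)) : ∀ n : Int, 0 ≤ n → 0 ≤ pvG n l := by
  induction l with
  | nil => intro n _; simp [pvG]
  | cons p t ih =>
    intro n h
    cases p with
    | none => simpa [pvG] using ih 0 le_rfl
    | some a =>
      have := ih (n+1) (by omega)
      simp only [pvG]
      omega

theorem pvDropWhileSome (t : List (Option Int)) :
    t.dropWhile (fun q => q.isSome) = [] ∨ ∃ r, t.dropWhile (fun q => q.isSome) = none :: r := by
  induction t with
  | nil => left; rfl
  | cons x t ih =>
    cases x with
    | none => right; exact ⟨t, by simp [List.dropWhile]⟩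
    | some a => simpa [List.dropWhile] using ih

theorem pvG_eq_alt_aux (N : Nat) : ∀ (l : List (Option Int)), l.length ≤ N →
    pvG 0 l = ((pvGroups l).filterMap (fun g => if g.1 then some g.2 else none)).foldl max 0 := by
  induction N with
  | zero =>
    intro l hl
    have : l = [] := List.eq_nil_of_length_eq_zero (Nat.le_zero.mp hl)
    subst this; simp [pvG, pvGroups_nil]
  | succ N ih =>
    intro l hl
    match l with
    | [] => simp [pvG, pvGroups_nil]
    | none :: t =>
      rw [pvGroups_cons]
      simp only [Option.isSome_none]
      have hsplit := List.takeWhile_append_dropWhile (p := fun q => q.isSome == false) (l := t)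
      have htw : ∀ x ∈ t.takeWhile (fun q => q.isSome == false), x.isSome = false := by
        intro x hx
        have := List.mem_takeWhile_imp hx
        simpa using this
      have hlen : (t.dropWhile (fun q => q.isSome == false)).length ≤ N := by
        have h1 := List.length_dropWhile_le (p := fun q => q.isSome == false) (l := t)
        simp only [List.length_cons] at hl
        omega
      calc pvG 0 (none :: t) = pvG 0 t := by simp [pvG]
        _ = pvG 0 (t.takeWhile (fun q => q.isSome == false) ++ t.dropWhile (fun q => q.isSome == false)) := by rw [hsplit]
        _ = pvG 0 (t.dropWhile (fun q => q.isSome == false)) := pvG_none_run _ htw _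
        _ = _ := by
              rw [ih _ hlen]
              simp [List.filterMap]
    | some a :: t =>
      rw [pvGroups_cons]
      simp only [Option.isSome_some]
      have hsplit := List.takeWhile_append_dropWhile (p := fun q => q.isSome == true) (l := t)
      have htw : ∀ x ∈ t.takeWhile (fun q => q.isSome == true), x.isSome = true := by
        intro x hx
        have := List.mem_takeWhile_imp hx
        simpa using this
      have hlen : (t.dropWhile (fun q => q.isSome == true)).length ≤ N := by
        have h1 := List.length_dropWhile_le (p := fun q => q.isSome == true) (l := t)
        simp only [List.length_cons] at hl
        omega
      have hdw : t.dropWhile (fun q => q.isSome == true) = [] ∨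
          ∃ r, t.dropWhile (fun q => q.isSome == true) = none :: r := by
        have := pvDropWhileSome t
        simpa using this
      have hG : pvG 0 (some a :: t)
          = max (1 + ((t.takeWhile (fun q => q.isSome == true)).length : Int))
                (pvG 0 (t.dropWhile (fun q => q.isSome == true))) := by
        conv_lhs => rw [show t = t.takeWhile (fun q => q.isSome == true) ++ t.dropWhile (fun q => q.isSome == true) from hsplit.symm]
        rw [pvG_some_run _ htw _ a 0 (le_refl 0), pvG_reset _ hdw]
        norm_num
      rw [hG, ih _ hlen]
      norm_num [List.filterMap_cons]
      rw [max_comm (0 : Int), pvFoldMax]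

-- ===== VERDICT (by name: the statement is the Claim_ definition above) =====
theorem count_max_consecutive_peak_num_spec : Claim_equal_count_max_consecutive_peak_num := by
  intro peaks _
  unfold Spec_count_max_consecutive_peak_num count_max_consecutive_peak_num count_max_consecutive_peak_num_alt
  rw [pvA_step peaks 0 0 le_rfl le_rfl, max_eq_right (pvG_nonneg peaks 0 le_rfl),
      pvG_eq_alt_aux peaks.length peaks le_rfl]
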